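-- pv_equiv track=rewrite | github.com/ada-url/ada | tools/release/lib/release.py | multiple_contributors_mention_md
-- ===== SOURCE A (Python) =====
-- from typing import Optional, List, Set, Union, Type
--
-- def multiple_contributors_mention_md(contributors: List[str]) -> str:
--     contrib_by = ""
--     if len(contributors) <= 1:
--         for contrib in contributors:
--             contrib_by += f"@{contrib}"
--     else:
--         for contrib in contributors:
--             contrib_by += f"@{contrib}, "
--
--         contrib_by = contrib_by[:-2]
--         last_comma = contrib_by.rfind(", ")
--         contrib_by = (
--             contrib_by[:last_comma].strip()
--             + " and "
--             + contrib_by[last_comma + 1 :].strip()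
--         )
--     return contrib_by
-- ===== SOURCE B (Python) =====
-- from typing import List
--
--
-- def multiple_contributors_mention_md(contributors: List[str]) -> str:
--     mentions = [f"@{contrib}" for contrib in contributors]
--     if len(mentions) <= 1:
--         return "".join(mentions)
--     return ", ".join(mentions[:-1]).strip() + " and " + mentions[-1].strip()
-- ===== Notes on version B (the rewrite author's own statement) =====
-- stated objective: simpler
-- what changed: B builds the mention list once and forms the result by list slicing/indexing (join of all but the last mention, ' and ', the last mention), replacing A's running string concatenation, trailing-separator chop and rfind scan for the last separator.
-- intended difference: On lists of >= 2 names whose last name contains ', ', A's rfind hits that comma inside the name and splits the final mention in the middle (['a', 'b, c'] -> '@a, @b and c'); B keeps the final mention whole ('@a and @b, c'), which is the intended formatting. — e.g. on multiple_contributors_mention_md(["a", "b, c"]): A returns "@a, @b and c", B returns "@a and @b, c"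
import Mathlib
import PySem

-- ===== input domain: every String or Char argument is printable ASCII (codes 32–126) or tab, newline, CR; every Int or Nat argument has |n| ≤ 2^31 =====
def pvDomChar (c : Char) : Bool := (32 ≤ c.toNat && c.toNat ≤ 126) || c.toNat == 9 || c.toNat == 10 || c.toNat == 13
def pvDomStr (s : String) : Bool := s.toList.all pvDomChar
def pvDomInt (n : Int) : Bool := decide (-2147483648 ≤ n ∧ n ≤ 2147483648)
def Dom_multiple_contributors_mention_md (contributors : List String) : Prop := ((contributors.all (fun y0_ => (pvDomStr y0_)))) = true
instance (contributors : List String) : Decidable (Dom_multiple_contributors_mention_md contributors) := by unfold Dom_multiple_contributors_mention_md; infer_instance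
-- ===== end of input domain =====

-- B builds the mention list and joins its parts by list slicing/indexing instead of A's running
-- string concatenation + trailing-separator strip + rfind scan (objective: simpler).

-- ===== PORT A =====
def multiple_contributors_mention_md (contributors : List String) : String :=
  let contrib_by : String := ""
  if contributors.length ≤ 1 then
    contributors.foldl (fun acc contrib => acc ++ "@" ++ contrib) contrib_by
  else
    let s1 := contributors.foldl (fun acc contrib => acc ++ "@" ++ contrib ++ ", ") contrib_by
    let s2 := PySem.Str.slice s1 none (some (-2))
    let last_comma := PySem.Str.rfind s2 ", "
    PySem.Str.strip (PySem.Str.slice s2 none (some last_comma)) ++ " and " ++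
      PySem.Str.strip (PySem.Str.slice s2 (some (last_comma + 1)) none)

-- ===== PORT B =====
def multiple_contributors_mention_md_alt (contributors : List String) : String :=
  let mentions := contributors.map (fun contrib => "@" ++ contrib)
  if mentions.length ≤ 1 then
    PySem.Str.join "" mentions
  else
    PySem.Str.strip (PySem.Str.join ", " (PySem.List.slice mentions none (some (-1)))) ++
      " and " ++ PySem.Str.strip ((PySem.List.pyGet? mentions (-1)).getD "")

-- ===== PRECONDITION & SPEC =====
-- On lists of ≥ 2 names whose LAST name contains ", ", A's rfind locates that comma inside the
-- name instead of the last separator and returns a mention list broken in the middle of the last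
-- name (e.g. ["a", "b, c"] ↦ "@a, @b and c"); B returns the intended "@a and @b, c" joining the
-- final mention whole.
def D_multiple_contributors_mention_md (contributors : List String) : Prop :=
  2 ≤ contributors.length ∧ PySem.Str.isIn ", " (contributors.getLast?.getD "") = true
instance (contributors : List String) : Decidable (D_multiple_contributors_mention_md contributors) := by unfold D_multiple_contributors_mention_md; infer_instance
def Spec_multiple_contributors_mention_md (contributors : List String) (out : String) : Prop := ¬ D_multiple_contributors_mention_md contributors → out = multiple_contributors_mention_md_alt contributors
instance (contributors : List String) (out : String) : Decidable (Spec_multiple_contributors_mention_md contributors out) := by unfold Spec_multiple_contributors_mention_md; infer_instance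
def pvDiffWitness_multiple_contributors_mention_md : List String := ["a", "b, c"]
def pvDiffWitnessOut_multiple_contributors_mention_md : String × String := ("@a, @b and c", "@a and @b, c")

-- ===== CLAIM (what is proved, stated in full; the proofs are below) =====
def Claim_unchanged_multiple_contributors_mention_md : Prop := ∀ (contributors : List String), Dom_multiple_contributors_mention_md contributors → Spec_multiple_contributors_mention_md contributors (multiple_contributors_mention_md contributors)
def Claim_changed_multiple_contributors_mention_md : Prop := Dom_multiple_contributors_mention_md (pvDiffWitness_multiple_contributors_mention_md) ∧ D_multiple_contributors_mention_md (pvDiffWitness_multiple_contributors_mention_md) ∧ multiple_contributors_mention_md (pvDiffWitness_multiple_contributors_mention_md) = pvDiffWitnessOut_multiple_contributors_mention_md.1 ∧ multiple_contributors_mention_md_alt (pvDiffWitness_multiple_contributors_mention_md) = pvDiffWitnessOut_multiple_contributors_mention_md.2 ∧ pvDiffWitnessOut_multiple_contributors_mention_md.1 ≠ pvDiffWitnessOut_multiple_contributors_mention_md.2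

-- ===== LEMMAS AND PROOFS =====

-- A's accumulation loop, with the separator appended after every mention.
lemma pvStrExt (a b : String) (h : a.toList = b.toList) : a = b :=
  String.ext (by simpa [String.toList] using h)

lemma pvFoldA (l : List String) (acc : String) :
    (l.foldl (fun a c => a ++ "@" ++ c ++ ", ") acc).toList
      = acc.toList ++ l.flatMap (fun c => '@' :: (c.toList ++ [',', ' '])) := by
  induction l generalizing acc with
  | nil => simp
  | cons h t ih => simp [ih, String.toList_append]

lemma pvFlatMap_join (l : List (List Char)) (sep : List Char) (h : l ≠ []) :
    l.flatMap (fun m => m ++ sep) = PySem.Chars.join sep l ++ sep := by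
  induction l with
  | nil => exact absurd rfl h
  | cons a t ih =>
    cases t with
    | nil => simp [PySem.Chars.join_singleton]
    | cons b t' =>
      rw [List.flatMap_cons, ih (by simp), PySem.Chars.join_cons_cons]
      simp

lemma pvJoin_snoc (sep a : List Char) (l : List (List Char)) (h : l ≠ []) :
    PySem.Chars.join sep (l ++ [a]) = PySem.Chars.join sep l ++ sep ++ a := by
  induction l with
  | nil => exact absurd rfl h
  | cons b t ih =>
    cases t with
    | nil => simp [PySem.Chars.join_singleton, PySem.Chars.join_cons_cons]
    | cons c t' =>
      simp only [List.cons_append] at ih ⊢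
      rw [PySem.Chars.join_cons_cons, ih (by simp), PySem.Chars.join_cons_cons]
      simp

lemma pvGoZero (s sub : List Char) :
    PySem.Chars.rfind.go s sub 0 = if sub.isPrefixOf s then 0 else -1 := by
  simp [PySem.Chars.rfind.go]

lemma pvGoSucc (s sub : List Char) (j : Nat) :
    PySem.Chars.rfind.go s sub (j + 1)
      = if sub.isPrefixOf (List.drop (j + 1) s) then ((j : Int) + 1)
        else PySem.Chars.rfind.go s sub j := by
  simp [PySem.Chars.rfind.go]

lemma pvRfindGo (s sub : List Char) (p : Nat) : ∀ (k : Nat), p ≤ k →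
    sub.isPrefixOf (s.drop p) = true →
    (∀ j, p < j → j ≤ k → sub.isPrefixOf (s.drop j) = false) →
    PySem.Chars.rfind.go s sub k = (p : Int) := by
  intro k
  induction k with
  | zero =>
    intro hpk hp _
    interval_cases p
    rw [pvGoZero]
    simpa using hp
  | succ j ih =>
    intro hpk hp hno
    rw [pvGoSucc]
    by_cases hj : p = j + 1
    · subst hj
      rw [if_pos (by simpa using hp)]
      push_cast
      ring
    · have hlt : p ≤ j := by omega
      rw [if_neg (by simp [hno (j + 1) (by omega) (by omega)])]
      exact ih hlt hp (fun i h1 h2 => hno i h1 (by omega))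

-- rfind on P ++ ", " ++ L with no ", " occurrence inside ' '::L finds exactly the separator.
lemma pvRfind_sep (P L : List Char) (hL : ¬ [',', ' '] <:+: L) :
    PySem.Chars.rfind (P ++ ',' :: ' ' :: L) [',', ' '] = (P.length : Int) := by
  unfold PySem.Chars.rfind
  apply pvRfindGo
  · simp
  · rw [List.drop_left]
    simp [List.isPrefixOf]
  · intro j h1 h2
    rw [List.drop_append]
    have hd : List.drop j P = [] := List.drop_eq_nil_of_le (by omega)
    rw [hd, List.nil_append]
    rcases Nat.exists_eq_add_of_lt h1 with ⟨m, hm⟩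
    subst hm
    have : P.length + m + 1 - P.length = m + 1 := by omega
    rw [this]
    cases m with
    | zero =>
      simp [List.isPrefixOf]
    | succ m' =>
      -- drop (m'+2) (','::' '::L) = L.drop m'
      have hdrop : List.drop (m' + 1 + 1) (',' :: ' ' :: L) = L.drop m' := rfl
      rw [hdrop]
      by_contra hcon
      have hpre : [',', ' '] <+: L.drop m' := by
        rw [← List.isPrefixOf_iff_prefix]
        revert hcon
        cases h : ([',', ' '].isPrefixOf (L.drop m')) <;> simp
      exact hL (hpre.isInfix.trans (List.drop_suffix m' L).isInfix)

lemma pvStrip_cons_space (L : List Char) :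
    PySem.Chars.strip (' ' :: L) = PySem.Chars.strip L := by
  have hsp : PySem.Chars.isspace ' ' = true := by decide
  simp [PySem.Chars.strip, PySem.Chars.lstrip, List.dropWhile, hsp]

-- the core computation on a snoc-decomposed list of ≥ 2 contributors
lemma pvMain (i : List String) (z : String) (hi : i ≠ [])
    (hz : ¬ [',', ' '] <:+: z.toList) :
    multiple_contributors_mention_md (i ++ [z])
      = multiple_contributors_mention_md_alt (i ++ [z]) := by
  apply pvStrExt
  have hlen : ¬ (i ++ [z]).length ≤ 1 := by
    cases i with
    | nil => exact absurd rfl hi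
    | cons a t => simp
  -- chars-level data
  set sep : List Char := [',', ' '] with hsep
  set Msi : List (List Char) := i.map (fun c => '@' :: c.toList) with hMsi
  set L : List Char := '@' :: z.toList with hLdef
  set P : List Char := PySem.Chars.join sep Msi with hP
  have hMsiNe : Msi ≠ [] := by simp [hMsi, hi]
  have hLinf : ¬ sep <:+: L := by
    rw [hLdef, hsep]
    intro hinf
    rcases List.infix_cons_iff.mp hinf with hpre | hinf'
    · rcases hpre with ⟨t, ht⟩
      simp at ht
    · exact hz hinf'
  -- ===== A side =====
  have hs1 : ((i ++ [z]).foldl (fun a c => a ++ "@" ++ c ++ ", ") "").toList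
      = (P ++ ',' :: ' ' :: L) ++ [',', ' '] := by
    rw [pvFoldA]
    have h1 : (i ++ [z]).flatMap (fun c => '@' :: (c.toList ++ [',', ' ']))
        = ((i ++ [z]).map (fun c => '@' :: c.toList)).flatMap (fun m => m ++ sep) := by
      rw [List.flatMap_map]
      simp [hsep]
    rw [h1, pvFlatMap_join _ _ (by simp)]
    have h2 : (i ++ [z]).map (fun c => '@' :: c.toList) = Msi ++ [L] := by
      simp [hMsi, hLdef]
    rw [h2, pvJoin_snoc sep L Msi hMsiNe, hP]
    simp [hsep]
  have hs2 : (PySem.Str.slice ((i ++ [z]).foldl (fun a c => a ++ "@" ++ c ++ ", ") "") none (some (-2))).toList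
      = P ++ ',' :: ' ' :: L := by
    simp only [PySem.Str.slice, String.toList_ofList, PySem.Chars.slice_eq_listSlice]
    rw [PySem.List.slice_to_neg_ofNat _ 2 (by omega), hs1]
    have : ((P ++ ',' :: ' ' :: L) ++ [',', ' ']).length - 2 = (P ++ ',' :: ' ' :: L).length := by
      simp
      omega
    rw [this, List.take_left]
  have hrf : PySem.Str.rfind (PySem.Str.slice ((i ++ [z]).foldl (fun a c => a ++ "@" ++ c ++ ", ") "") none (some (-2))) ", "
      = (P.length : Int) := by
    rw [PySem.Str.rfind_eq, hs2]
    rw [show (", " : String).toList = [',', ' '] from by simp]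
    exact pvRfind_sep P L (by rw [hsep] at hLinf; exact hLinf)
  have htake : (P ++ ',' :: ' ' :: L).take P.length = P := List.take_left
  have hdrop : (P ++ ',' :: ' ' :: L).drop (P.length + 1) = ' ' :: L := by
    rw [List.drop_append]
    rw [List.drop_eq_nil_of_le (by omega), List.nil_append]
    have : P.length + 1 - P.length = 1 := by omega
    rw [this]
    rfl
  have hA : (multiple_contributors_mention_md (i ++ [z])).toList
      = PySem.Chars.strip P ++ (" and " : String).toList ++ PySem.Chars.strip L := by
    unfold multiple_contributors_mention_md
    rw [if_neg hlen]
    simp only [String.toList_append, PySem.Str.toList_strip, hrf]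
    have hs2' := hs2
    simp only [PySem.Str.slice, String.toList_ofList, PySem.Chars.slice_eq_listSlice] at hs2' ⊢
    rw [hs2']
    rw [PySem.List.slice_to_natCast, htake]
    rw [show ((P.length : Int) + 1) = ((P.length + 1 : Nat) : Int) from by push_cast; ring]
    rw [PySem.List.slice_from_natCast, hdrop, pvStrip_cons_space]
  -- ===== B side =====
  have hg : ∀ c : String, ("@" ++ c).toList = '@' :: c.toList := by
    intro c
    rw [String.toList_append]
    simp
  have hmen : (i ++ [z]).map (fun c => "@" ++ c) = i.map (fun c => "@" ++ c) ++ ["@" ++ z] := by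
    simp
  have hB : (multiple_contributors_mention_md_alt (i ++ [z])).toList
      = PySem.Chars.strip P ++ (" and " : String).toList ++ PySem.Chars.strip L := by
    have hjoin : (PySem.Str.join ", " (PySem.List.slice ((i ++ [z]).map (fun c => "@" ++ c)) none (some (-1)))).toList = P := by
      rw [hmen, PySem.List.slice_to_neg_one, List.dropLast_concat]
      rw [PySem.Str.toList_join]
      rw [hP, hMsi, hsep]
      rw [show (", " : String).toList = [',', ' '] from by simp]
      have hmm : List.map String.toList (List.map (fun c : String => "@" ++ c) i)
          = List.map (fun c : String => '@' :: c.toList) i := by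
        rw [List.map_map]
        apply List.map_congr_left
        intro a _
        exact hg a
      rw [hmm]
    have hidx : PySem.List.pyGet? ((i ++ [z]).map (fun c => "@" ++ c)) (-1)
        = some ("@" ++ z) := by
      rw [hmen]
      simp only [PySem.List.pyGet?, PySem.List.pyIdx?]
      rw [if_neg (by omega)]
      have hlen2 : (i.map (fun c => "@" ++ c) ++ ["@" ++ z]).length
          = i.length + 1 := by simp
      rw [if_pos (by rw [hlen2]; omega)]
      simp only [hlen2]
      have h3 : i.length + 1 - (-(-1 : Int)).toNat = (List.map (fun c => "@" ++ c) i).length := by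
        simp
      rw [h3]
      exact List.getElem?_concat_length
    unfold multiple_contributors_mention_md_alt
    rw [if_neg (by simpa using hlen)]
    simp only [String.toList_append, PySem.Str.toList_strip, hidx, Option.getD_some]
    rw [hjoin, show ("@" : String).toList = ['@'] from by simp, hLdef]
    simp
  rw [hA, hB]

-- ===== VERDICT (by name: the statement is the Claim_ definition above) =====
theorem multiple_contributors_mention_md_spec : Claim_unchanged_multiple_contributors_mention_md := by
  intro contributors _ hnd
  by_cases hle : contributors.length ≤ 1
  · cases contributors with
    | nil => decide
    | cons a t =>
      cases t with
      | nil =>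
        apply pvStrExt
        unfold multiple_contributors_mention_md multiple_contributors_mention_md_alt
        simp only [List.length_cons, List.length_nil, List.map_cons, List.map_nil,
          List.foldl_cons, List.foldl_nil, if_pos (by omega : (1 : Nat) ≤ 1)]
        rw [PySem.Str.toList_join]
        simp only [List.map_cons, List.map_nil, PySem.Chars.join_singleton]
        simp [String.toList_append]
      | cons b t' => simp at hle
  · have hne : contributors ≠ [] := by
      intro h
      rw [h] at hle
      simp at hle
    have hz : ¬ [',', ' '] <:+: (contributors.getLast hne).toList := by
      intro hinf
      apply hnd
      constructor
      · omega
      · rw [List.getLast?_eq_some_getLast hne]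
        simp only [Option.getD_some]
        rw [show (PySem.Str.isIn ", " (contributors.getLast hne))
            = PySem.Chars.isIn (", ").toList (contributors.getLast hne).toList from rfl]
        rw [show (", " : String).toList = [',', ' '] from by decide]
        cases h : PySem.Chars.isIn [',', ' '] (contributors.getLast hne).toList
        · exact absurd hinf ((PySem.Chars.isIn_eq_false_iff _ _).mp h)
        · rfl
    have hsplit := List.dropLast_append_getLast hne
    have hdne : contributors.dropLast ≠ [] := by
      intro h
      have := congrArg List.length hsplit
      simp [h] at this
      omega
    rw [← hsplit]
    exact pvMain _ _ hdne hz

theorem multiple_contributors_mention_md_changed : Claim_changed_multiple_contributors_mention_md := by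
  unfold Claim_changed_multiple_contributors_mention_md
  decide
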